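-- pv_equiv track=rewrite | github.com/JeanneSon/image-tagging | tagging.py | array_to_tuple
-- ===== SOURCE A (Python) =====
-- def array_to_tuple(a):  #a stands for array
--     result = []
--     for word in a:
--         word_array = []
--         for c in word: #c stands for character
--             word_array += [ord(c), 0]
--         word_array += [ord(";"), 0]
--         result += word_array
--     result += [0, 0]
--     return tuple(result)
-- ===== SOURCE B (Python) =====
-- def array_to_tuple(a):  # a stands for array
--     # Join everything into one separator-terminated string, then preallocate the
--     # output and fill the even positions with the character codes in one strided
--     # slice assignment; no nested Python loops, no per-word accumulators.
--     s = "".join(w + ";" for w in a)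
--     out = [0] * (2 * len(s) + 2)
--     out[0 : 2 * len(s) : 2] = map(ord, s)
--     return tuple(out)
-- ===== Notes on version B (the rewrite author's own statement) =====
-- stated objective: alternative
-- what changed: B joins all words with ';' terminators into one string, preallocates a zero list of the final length, and writes the character codes into the even positions with a single strided slice assignment, instead of A's nested Python loops building and concatenating per-word accumulator lists.
import Mathlib
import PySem

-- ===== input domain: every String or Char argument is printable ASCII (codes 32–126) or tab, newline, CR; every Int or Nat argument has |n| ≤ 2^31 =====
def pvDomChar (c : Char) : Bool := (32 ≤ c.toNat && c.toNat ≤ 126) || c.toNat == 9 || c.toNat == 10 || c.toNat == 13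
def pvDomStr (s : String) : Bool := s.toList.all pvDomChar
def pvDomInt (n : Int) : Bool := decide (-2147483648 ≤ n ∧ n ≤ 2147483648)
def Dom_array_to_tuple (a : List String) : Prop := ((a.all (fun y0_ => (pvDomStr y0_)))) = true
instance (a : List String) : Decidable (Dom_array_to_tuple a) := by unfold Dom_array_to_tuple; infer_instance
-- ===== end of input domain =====

-- B joins the words into one ';'-terminated string, preallocates the zero output and writes the
-- char codes into the even positions by one strided slice assignment; a different algorithm of the same cost class.


-- ===== PORT A =====
-- literal port: per word build word_array (char code, 0 pairs), append [ord ';', 0], extend result; finally += [0,0]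
def array_to_tuple (a : List String) : List Int :=
  (a.foldl (fun result word =>
      let word_array :=
        (word.toList.foldl (fun wa c => wa ++ [(c.toNat : Int), 0]) []) ++ [((';'.toNat : Int)), 0]
      result ++ word_array) []) ++ [0, 0]

-- ===== PORT B =====
-- out[0 : 2*len(vals) : 2] = vals over a base list: replace every even index < 2*len(vals)
def pyAssignStride2 : List Int → List Int → List Int
  | out, [] => out
  | [], _ :: _ => []
  | [_], v :: _ => [v]
  | _ :: y :: rest, v :: vs => v :: y :: pyAssignStride2 rest vs

-- literal port of Source B: join words with ';' terminators, preallocate zeros, strided slice assignment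
def array_to_tuple_alt (a : List String) : List Int :=
  let s : List Char := (a.map (fun w => w.toList ++ [';'])).flatten
  let out : List Int := List.replicate (2 * s.length + 2) 0
  pyAssignStride2 out (s.map (fun c => (c.toNat : Int)))

-- ===== PRECONDITION & SPEC =====
def Spec_array_to_tuple (a : List String) (out : List Int) : Prop := out = array_to_tuple_alt a
instance (a : List String) (out : List Int) : Decidable (Spec_array_to_tuple a out) := by unfold Spec_array_to_tuple; infer_instance

-- ===== CLAIM (what is proved, stated in full; the proofs are below) =====
def Claim_equal_array_to_tuple : Prop := ∀ (a : List String), Dom_array_to_tuple a → Spec_array_to_tuple a (array_to_tuple a)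

-- ===== LEMMAS AND PROOFS =====
-- A's inner char loop produces the flat encoding of the word's characters
theorem pv_inner_foldl (l : List Char) (acc : List Int) :
    l.foldl (fun wa c => wa ++ [(c.toNat : Int), 0]) acc
      = acc ++ l.flatMap (fun c => [(c.toNat : Int), 0]) := by
  induction l generalizing acc with
  | nil => simp
  | cons c l ih => simp [List.foldl_cons, ih, List.append_assoc]

-- A's outer loop equals the encoding of the flattened symbol stream
theorem pv_outer_foldl (a : List String) (acc : List Int) :
    a.foldl (fun result word =>
        result ++ ((word.toList.foldl (fun wa c => wa ++ [(c.toNat : Int), 0]) []) ++ [((';'.toNat : Int)), 0])) acc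
      = acc ++ ((a.map (fun w => w.toList ++ [';'])).flatten).flatMap (fun c => [(c.toNat : Int), 0]) := by
  induction a generalizing acc with
  | nil => simp
  | cons w a ih =>
    rw [List.foldl_cons, ih, pv_inner_foldl]
    simp [List.flatMap_cons, List.flatMap_append, List.append_assoc]

-- the strided assignment over a fresh zero list interleaves the values with zeros
theorem pv_assign_stride2 (vs : List Int) :
    pyAssignStride2 (List.replicate (2 * vs.length + 2) 0) vs
      = vs.flatMap (fun v => [v, 0]) ++ [0, 0] := by
  induction vs with
  | nil => rfl
  | cons v vs ih =>
    have h : 2 * (v :: vs).length + 2 = (2 * vs.length + 2) + 2 := by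
      simp [List.length_cons]; ring
    rw [h, List.replicate_succ, List.replicate_succ, pyAssignStride2, ih]
    simp

-- ===== VERDICT (by name: the statement is the Claim_ definition above) =====
theorem array_to_tuple_spec : Claim_equal_array_to_tuple := by
  intro a _
  unfold Spec_array_to_tuple array_to_tuple array_to_tuple_alt
  rw [pv_outer_foldl]
  have h := pv_assign_stride2
      (((a.map (fun w => w.toList ++ [';'])).flatten).map (fun c => ((c.toNat : Int))))
  simp only [List.length_map] at h
  rw [h, List.flatMap_map]
  simp
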